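-- pv_equiv track=rewrite | github.com/udaydirsipamu/uday-teja | PythonDay14/ulsum.py | ul_sum
-- ===== SOURCE A (Python) =====
-- def ul_sum(matrix):
--     u_sum=0
--     l_sum=0
--     n=len(matrix)
--     for i in range(n):
--         for j in range(n):
--             if j>=i:
--                 u_sum += matrix[i][j]
--             if i>=j:
--
--                 l_sum += matrix[i][j]
--     return u_sum,l_sum
-- ===== SOURCE B (Python) =====
-- def ul_sum(matrix):
--     n = len(matrix)
--     total = 0
--     diag = 0
--     l_sum = 0
--     for i, row in enumerate(matrix):
--         total += sum(row[:n])
--         diag += row[i]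
--         l_sum += sum(row[:i + 1])
--     return total + diag - l_sum, l_sum
-- ===== Notes on version B (the rewrite author's own statement) =====
-- stated objective: alternative
-- what changed: B never iterates the upper triangle: one pass over enumerate(matrix) accumulates the full-row totals, the diagonal and the lower-triangle sum via row slices and builtin sum, and recovers the upper sum by the inclusion-exclusion identity u_sum = total + diag - l_sum.
import Mathlib
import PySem

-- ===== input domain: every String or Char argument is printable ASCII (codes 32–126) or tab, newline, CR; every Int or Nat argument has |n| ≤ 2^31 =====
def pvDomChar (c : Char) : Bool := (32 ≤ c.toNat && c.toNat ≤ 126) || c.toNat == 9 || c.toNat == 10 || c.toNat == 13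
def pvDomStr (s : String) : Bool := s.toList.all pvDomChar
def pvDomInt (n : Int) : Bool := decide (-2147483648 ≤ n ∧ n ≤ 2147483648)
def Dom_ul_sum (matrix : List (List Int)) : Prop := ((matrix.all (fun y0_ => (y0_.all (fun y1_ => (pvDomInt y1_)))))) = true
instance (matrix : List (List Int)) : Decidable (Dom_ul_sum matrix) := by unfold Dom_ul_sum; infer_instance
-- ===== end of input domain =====

-- B replaces A's branchy full n×n scan by one pass accumulating row totals, the diagonal and the
-- lower-triangle sum, recovering the upper sum via u_sum = total + diag - l_sum (alternative decomposition).


-- ===== PORT A =====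
def ul_sum (matrix : List (List Int)) : Int × Int :=
  let n : Int := matrix.length
  (PySem.List.pyRange 0 n 1).foldl (fun acc i =>
    (PySem.List.pyRange 0 n 1).foldl (fun acc2 j =>
      let u := if j ≥ i then acc2.1 + PySem.List.pyGetD (PySem.List.pyGetD matrix i []) j 0 else acc2.1
      let l := if i ≥ j then acc2.2 + PySem.List.pyGetD (PySem.List.pyGetD matrix i []) j 0 else acc2.2
      (u, l)) acc) ((0 : Int), (0 : Int))

-- ===== PORT B =====
def ul_sum_alt (matrix : List (List Int)) : Int × Int :=
  let n : Int := matrix.length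
  let st := (PySem.List.enumerate matrix 0).foldl
    (fun (acc : Int × Int × Int) p =>
      (acc.1 + (PySem.List.slice p.2 none (some n)).sum,
       acc.2.1 + PySem.List.pyGetD p.2 p.1 0,
       acc.2.2 + (PySem.List.slice p.2 none (some (p.1 + 1))).sum))
    ((0 : Int), (0 : Int), (0 : Int))
  (st.1 + st.2.1 - st.2.2, st.2.2)

-- ===== PRECONDITION & SPEC =====
-- Pre_ excludes exactly the inputs where A raises IndexError: a row shorter than len(matrix).
def Pre_ul_sum (matrix : List (List Int)) : Prop :=
  ∀ row ∈ matrix, matrix.length ≤ row.length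

instance (matrix : List (List Int)) : Decidable (Pre_ul_sum matrix) := by
  unfold Pre_ul_sum; infer_instance

def pvWitness_ul_sum : List (List Int) := [[1, 2], [3, 4]]

def Spec_ul_sum (matrix : List (List Int)) (out : Int × Int) : Prop := out = ul_sum_alt matrix
instance (matrix : List (List Int)) (out : Int × Int) : Decidable (Spec_ul_sum matrix out) := by unfold Spec_ul_sum; infer_instance

-- ===== CLAIM =====
def Claim_equal_ul_sum : Prop := ∀ (matrix : List (List Int)), Dom_ul_sum matrix → Pre_ul_sum matrix → Spec_ul_sum matrix (ul_sum matrix)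

-- ===== LEMMAS AND PROOFS =====

-- A's inner loop, on an arbitrary index list, splits into two filtered sums
theorem pair_foldl_inner (f : Int → Int) (i : Int) :
    ∀ (L : List Int) (a b : Int),
      L.foldl (fun acc2 j =>
        ((if j ≥ i then acc2.1 + f j else acc2.1),
         (if i ≥ j then acc2.2 + f j else acc2.2))) (a, b)
      = (a + ((L.filter (fun j => i ≤ j)).map f).sum,
         b + ((L.filter (fun j => j ≤ i)).map f).sum) := by
  intro L
  induction L with
  | nil => intro a b; simp
  | cons x xs ih =>
    intro a b
    simp only [List.foldl_cons, List.filter_cons]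
    by_cases hx : i ≤ x <;> by_cases hx' : x ≤ i <;>
      simp [hx, hx', ge_iff_le, ih] <;> (try constructor) <;> (first | trivial | ring)

-- A's outer loop accumulates a pair of sums
theorem pair_foldl_outer (U L : Int → Int) :
    ∀ (R : List Int) (a b : Int),
      R.foldl (fun acc i => (acc.1 + U i, acc.2 + L i)) (a, b)
      = (a + (R.map U).sum, b + (R.map L).sum) := by
  intro R
  induction R with
  | nil => intro a b; simp
  | cons x xs ih => intro a b; simp [ih]; constructor <;> ring

theorem filter_le_range (i n : Int) (h0 : 0 ≤ i) (hn : i ≤ n) :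
    (PySem.List.pyRange 0 n 1).filter (fun j => i ≤ j) = PySem.List.pyRange i n 1 := by
  rw [PySem.List.pyRange_one_append 0 i n h0 hn, List.filter_append]
  have h1 : (PySem.List.pyRange 0 i 1).filter (fun j => i ≤ j) = [] := by
    apply List.filter_eq_nil_iff.mpr
    intro x hx
    have := (PySem.List.mem_pyRange_one).mp hx
    simp; omega
  have h2 : (PySem.List.pyRange i n 1).filter (fun j => i ≤ j) = PySem.List.pyRange i n 1 := by
    apply List.filter_eq_self.mpr
    intro x hx
    have := (PySem.List.mem_pyRange_one).mp hx
    simp; omega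
  rw [h1, h2]; simp

theorem filter_ge_range (i n : Int) (h0 : 0 ≤ i) (hn : i < n) :
    (PySem.List.pyRange 0 n 1).filter (fun j => j ≤ i) = PySem.List.pyRange 0 (i + 1) 1 := by
  rw [PySem.List.pyRange_one_append 0 (i + 1) n (by omega) (by omega), List.filter_append]
  have h1 : (PySem.List.pyRange 0 (i+1) 1).filter (fun j => j ≤ i) = PySem.List.pyRange 0 (i+1) 1 := by
    apply List.filter_eq_self.mpr
    intro x hx
    have := (PySem.List.mem_pyRange_one).mp hx
    simp; omega
  have h2 : (PySem.List.pyRange (i+1) n 1).filter (fun j => j ≤ i) = [] := by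
    apply List.filter_eq_nil_iff.mpr
    intro x hx
    have := (PySem.List.mem_pyRange_one).mp hx
    simp; omega
  rw [h1, h2]; simp

-- a pyRange sum of indexed reads is a sum of a drop/take segment of the row
theorem sum_pyGetD_range (row : List Int) :
    ∀ (k : Nat) (a : Int), 0 ≤ a → a + k ≤ row.length →
      ((PySem.List.pyRange a (a + k) 1).map (fun j => PySem.List.pyGetD row j 0)).sum
        = ((row.drop a.toNat).take k).sum := by
  intro k
  induction k with
  | zero => intro a _ _; simp [PySem.List.pyRange_one_eq_nil]
  | succ k ih =>
    intro a h0 hlen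
    have hcons : PySem.List.pyRange a (a + (k + 1 : Nat)) 1
        = a :: PySem.List.pyRange (a + 1) (a + (k + 1 : Nat)) 1 := by
      apply PySem.List.pyRange_one_cons; push_cast; omega
    have hrng : (a + 1) + (k : Nat) = a + ((k + 1 : Nat) : Int) := by push_cast; omega
    have hlt : a.toNat < row.length := by omega
    rw [hcons, List.map_cons, List.sum_cons, ← hrng,
        ih (a + 1) (by omega) (by omega),
        PySem.List.pyGetD_eq_getElem row 0 h0 (by omega)]
    have ht : (a + 1).toNat = a.toNat + 1 := by omega
    rw [ht]
    conv_rhs => rw [List.drop_eq_getElem_cons hlt, List.take_succ_cons, List.sum_cons]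

theorem sum_pyGetD_range' (row : List Int) (a b : Int)
    (h0 : 0 ≤ a) (hab : a ≤ b) (hb : b ≤ row.length) :
    ((PySem.List.pyRange a b 1).map (fun j => PySem.List.pyGetD row j 0)).sum
      = ((row.drop a.toNat).take (b.toNat - a.toNat)).sum := by
  have h := sum_pyGetD_range row (b.toNat - a.toNat) a h0 (by omega)
  have hb' : a + ((b.toNat - a.toNat : Nat) : Int) = b := by omega
  rw [hb'] at h
  exact h

-- B's one-pass loop with a triple accumulator is a triple of sums
theorem triple_foldl {α : Type} (f g h : α → Int) :
    ∀ (L : List α) (a b c : Int),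
      L.foldl (fun (acc : Int × Int × Int) x => (acc.1 + f x, acc.2.1 + g x, acc.2.2 + h x)) (a, b, c)
      = (a + (L.map f).sum, b + (L.map g).sum, c + (L.map h).sum) := by
  intro L
  induction L with
  | nil => intro a b c; simp
  | cons x xs ih => intro a b c; simp [ih]; refine ⟨by ring, by ring, by ring⟩

theorem sum_map_sub3 {α : Type} (f g h : α → Int) (L : List α) :
    (L.map (fun x => f x + g x - h x)).sum = (L.map f).sum + (L.map g).sum - (L.map h).sum := by
  induction L with
  | nil => simp
  | cons x xs ih => simp [ih]; ring

-- the per-row inclusion-exclusion identity: upper segment = full prefix + diagonal - lower prefix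
theorem tri_row (row : List Int) (k m : Nat) (hk : k < m) (hm : m ≤ row.length) :
    (row.take m).sum + row[k]'(lt_of_lt_of_le hk hm) - (row.take (k + 1)).sum
      = ((row.drop k).take (m - k)).sum := by
  have hsplit : row.take m = row.take (k + 1) ++ ((row.drop (k + 1)).take (m - (k + 1))) := by
    rw [← List.take_add]; congr 1; omega
  have hdrop : (row.drop k).take (m - k)
      = row[k]'(lt_of_lt_of_le hk hm) :: ((row.drop (k + 1)).take (m - (k + 1))) := by
    rw [List.drop_eq_getElem_cons (lt_of_lt_of_le hk hm)]
    have : m - k = (m - (k + 1)) + 1 := by omega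
    rw [this, List.take_succ_cons]
  rw [hsplit, hdrop]; simp; ring

-- ===== VERDICT =====
theorem ul_sum_spec : Claim_equal_ul_sum := by
  intro matrix _ hpre
  unfold Spec_ul_sum ul_sum ul_sum_alt
  simp only []
  set n : Int := (matrix.length : Int) with hn
  -- A side: reduce to a pair of pyRange sums
  have hinner : ∀ (acc : Int × Int) (i : Int), i ∈ PySem.List.pyRange 0 n 1 →
      (PySem.List.pyRange 0 n 1).foldl (fun acc2 j =>
        ((if j ≥ i then acc2.1 + PySem.List.pyGetD (PySem.List.pyGetD matrix i []) j 0 else acc2.1),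
         (if i ≥ j then acc2.2 + PySem.List.pyGetD (PySem.List.pyGetD matrix i []) j 0 else acc2.2))) acc
      = (acc.1 + ((PySem.List.pyRange i n 1).map (fun j =>
            PySem.List.pyGetD (PySem.List.pyGetD matrix i []) j 0)).sum,
         acc.2 + ((PySem.List.pyRange 0 (i + 1) 1).map (fun j =>
            PySem.List.pyGetD (PySem.List.pyGetD matrix i []) j 0)).sum) := by
    intro acc i hi
    obtain ⟨h0, h1⟩ := (PySem.List.mem_pyRange_one).mp hi
    obtain ⟨a, b⟩ := acc
    rw [pair_foldl_inner (fun j => PySem.List.pyGetD (PySem.List.pyGetD matrix i []) j 0) i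
          (PySem.List.pyRange 0 n 1) a b,
        filter_le_range i n h0 (le_of_lt h1), filter_ge_range i n h0 h1]
  rw [PySem.List.foldl_congr_mem _ _ _ _ hinner, pair_foldl_outer]
  -- B side: reduce to a triple of sums over the index range
  rw [PySem.List.enumerate_eq_map_pyRange matrix ([] : List Int), List.foldl_map,
      PySem.List.len_eq, ← hn, triple_foldl]
  simp only [zero_add]
  -- pointwise identification over the members of the range
  have hrowfacts : ∀ i, i ∈ PySem.List.pyRange 0 n 1 →
      matrix.length ≤ (PySem.List.pyGetD matrix i []).length := by
    intro i hi
    obtain ⟨h0, h1⟩ := (PySem.List.mem_pyRange_one).mp hi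
    exact hpre _ (PySem.List.pyGetD_mem matrix ([]) (by simp [PySem.Raise.InRange]; omega))
  have hpoint : ∀ i ∈ PySem.List.pyRange 0 n 1,
      ((PySem.List.pyRange i n 1).map (fun j =>
          PySem.List.pyGetD (PySem.List.pyGetD matrix i []) j 0)).sum
      = (PySem.List.slice (PySem.List.pyGetD matrix i []) none (some n)).sum
        + PySem.List.pyGetD (PySem.List.pyGetD matrix i []) i 0
        - (PySem.List.slice (PySem.List.pyGetD matrix i []) none (some (i + 1))).sum := by
    intro i hi
    obtain ⟨h0, h1⟩ := (PySem.List.mem_pyRange_one).mp hi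
    set row := PySem.List.pyGetD matrix i [] with hrow
    have hlen : matrix.length ≤ row.length := hrowfacts i hi
    have hkm : i.toNat < n.toNat := by omega
    have hmn : n.toNat ≤ row.length := by omega
    rw [sum_pyGetD_range' row i n h0 (by omega) (by omega),
        PySem.List.slice_to row (by omega : (0:Int) ≤ n),
        PySem.List.slice_to row (by omega : (0:Int) ≤ i + 1),
        PySem.List.pyGetD_eq_getElem row 0 h0 (by omega)]
    have h1t : (i + 1).toNat = i.toNat + 1 := by omega
    rw [h1t, ← tri_row row i.toNat n.toNat hkm hmn]
  have hlowpoint : ∀ i ∈ PySem.List.pyRange 0 n 1,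
      ((PySem.List.pyRange 0 (i + 1) 1).map (fun j =>
          PySem.List.pyGetD (PySem.List.pyGetD matrix i []) j 0)).sum
      = (PySem.List.slice (PySem.List.pyGetD matrix i []) none (some (i + 1))).sum := by
    intro i hi
    obtain ⟨h0, h1⟩ := (PySem.List.mem_pyRange_one).mp hi
    set row := PySem.List.pyGetD matrix i [] with hrow
    have hlen : matrix.length ≤ row.length := hrowfacts i hi
    rw [sum_pyGetD_range' row 0 (i + 1) le_rfl (by omega) (by omega),
        PySem.List.slice_to row (by omega : (0:Int) ≤ i + 1)]
    simp
  refine Prod.ext ?_ ?_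
  · simp only
    rw [List.map_congr_left hpoint, sum_map_sub3]
  · simp only
    rw [List.map_congr_left hlowpoint]
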